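-- pv_equiv track=rewrite | github.com/Brandt3/Programming-Competition | Potential Programs and Templates/Less Likely/score_rank_output.py | rank_players
-- ===== SOURCE A (Python) =====
-- def rank_players(players):
--     """Standard ranking: gaps after ties. Returns [(rank, name, score)]."""
--     ranked = sorted(players, key=lambda p: (-p[1], p[0]))
--     result = []
--     rank = 1
--     for i, (name, score) in enumerate(ranked):
--         if i > 0 and score < ranked[i-1][1]:
--             rank = i + 1                   # jump past tied positions
--         result.append((rank, name, score))
--     return result
-- ===== SOURCE B (Python) =====
-- def rank_players(players):
--     """Standard ranking: gaps after ties. Returns [(rank, name, score)]."""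
--     ordered = sorted(players, key=lambda p: (-p[1], p[0]))
--     result = []
--     n = len(ordered)
--     start = 0
--     while start < n:                      # one pass per score group
--         score = ordered[start][1]
--         end = start
--         while end < n and ordered[end][1] == score:
--             end += 1
--         for name, s in ordered[start:end]:
--             result.append((start + 1, name, s))
--         start = end
--     return result
-- ===== Notes on version B (the rewrite author's own statement) =====
-- stated objective: alternative
-- what changed: Replaces the enumerate loop that compares each element with its predecessor and mutates a rank variable by a group-at-a-time scan: each maximal run of equal scores is located with an inner scan and every member gets rank start+1, where start is the group's first index.
import Mathlib
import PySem

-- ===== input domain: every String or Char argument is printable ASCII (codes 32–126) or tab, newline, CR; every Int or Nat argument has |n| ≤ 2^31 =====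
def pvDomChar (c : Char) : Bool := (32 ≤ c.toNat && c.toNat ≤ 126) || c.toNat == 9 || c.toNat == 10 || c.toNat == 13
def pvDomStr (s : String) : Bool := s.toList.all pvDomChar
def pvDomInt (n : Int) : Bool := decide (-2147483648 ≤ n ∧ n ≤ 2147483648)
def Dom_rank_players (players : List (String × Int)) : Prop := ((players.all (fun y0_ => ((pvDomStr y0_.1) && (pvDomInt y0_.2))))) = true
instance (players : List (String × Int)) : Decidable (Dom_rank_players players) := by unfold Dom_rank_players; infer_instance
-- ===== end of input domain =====

-- B replaces A's element-by-element predecessor comparison with a group-at-a-time scan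
-- over the same sorted list (objective: alternative decomposition, same asymptotic cost).

-- ===== PORT A =====
-- sorted(players, key=lambda p: (-p[1], p[0])), then enumerate loop carrying (result, rank);
-- ranked[i-1] is read with pyGetD: under the guard 0 < i the index is always in range, so the
-- dummy default is never produced.
def rank_players (players : List (String × Int)) : List (Int × String × Int) :=
  let ranked := PySem.List.sorted2 players (fun p => -p.2) (fun p => p.1)
  ((PySem.List.enumerate ranked).foldl
    (fun st iv =>
      let rank := if 0 < iv.1 ∧ iv.2.2 < (PySem.List.pyGetD ranked (iv.1 - 1) ("", 0)).2
                  then iv.1 + 1 else st.2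
      (st.1 ++ [(rank, iv.2.1, iv.2.2)], rank))
    ([], 1)).1

-- ===== PORT B =====
-- B's outer while-loop over the remaining suffix, with `start` the absolute index of the
-- suffix's head; the inner while-scan for the end of the equal-score run is the
-- takeWhile/dropWhile span of that scan.
def altEmit : List (String × Int) → Nat → List (Int × String × Int)
  | [], _ => []
  | p :: ps, start =>
      let grp := (p :: ps).takeWhile (fun q => q.2 == p.2)
      let rest := (p :: ps).dropWhile (fun q => q.2 == p.2)
      grp.map (fun q => ((start : Int) + 1, q.1, q.2)) ++ altEmit rest (start + grp.length)
  termination_by xs _ => xs.length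
  decreasing_by
    simp only [List.dropWhile_cons, BEq.rfl, if_true]
    have := List.length_dropWhile_le (fun q => q.2 == p.2) ps
    simp only [List.length_cons]
    omega

def rank_players_alt (players : List (String × Int)) : List (Int × String × Int) :=
  altEmit (PySem.List.sorted2 players (fun p => -p.2) (fun p => p.1)) 0

-- ===== PRECONDITION & SPEC =====
def Spec_rank_players (players : List (String × Int)) (out : List (Int × String × Int)) : Prop := out = rank_players_alt players
instance (players : List (String × Int)) (out : List (Int × String × Int)) : Decidable (Spec_rank_players players out) := by unfold Spec_rank_players; infer_instance

-- ===== CLAIM (what is proved, stated in full; the proofs are below) =====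
def Claim_equal_rank_players : Prop := ∀ (players : List (String × Int)), Dom_rank_players players → Spec_rank_players players (rank_players players)

-- ===== LEMMAS AND PROOFS =====

-- A's loop, rephrased as a recursion carrying the previous score (proof-only helper).
def loopA : Option Int → Int → Int → List (String × Int) → List (Int × String × Int)
  | _, _, _, [] => []
  | prev?, i, r, v :: vs =>
      let r' := match prev? with
        | some ps => if v.2 < ps then i + 1 else r
        | none => r
      (r', v.1, v.2) :: loopA (some v.2) (i + 1) r' vs

-- A's loop at a group boundary: the head at absolute index `start` gets rank start+1.
def loopAB (start : Int) : List (String × Int) → List (Int × String × Int)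
  | [] => []
  | v :: vs => (start + 1, v.1, v.2) :: loopA (some v.2) (start + 1) (start + 1) vs

-- scores are non-increasing along the list
def nonincr (a b : String × Int) : Prop := b.2 ≤ a.2

lemma insertBy_pw (before : (String × Int) → (String × Int) → Bool)
    (h1 : ∀ a b, before a b = true → b.2 ≤ a.2)
    (h2 : ∀ a b, before a b = false → a.2 ≤ b.2)
    (x : String × Int) :
    ∀ ys : List (String × Int), ys.Pairwise nonincr →
      (PySem.List.insertBy before x ys).Pairwise nonincr := by
  intro ys
  induction ys with
  | nil => intro _; simp [PySem.List.insertBy, nonincr]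
  | cons y ys ih =>
      intro h
      rw [List.pairwise_cons] at h
      rw [PySem.List.insertBy.eq_def]
      by_cases hb : before x y = true
      · simp only [hb, if_true]
        refine List.pairwise_cons.2 ⟨?_, List.pairwise_cons.2 ⟨h.1, h.2⟩⟩
        intro z hz
        rcases List.mem_cons.1 hz with rfl | hz'
        · exact h1 _ _ hb
        · exact le_trans (h.1 z hz') (h1 _ _ hb)
      · simp only [hb]
        refine List.pairwise_cons.2 ⟨?_, ih h.2⟩
        intro z hz
        rcases (PySem.List.insertBy_mem_iff before x z ys).1 hz with rfl | hz'
        · exact h2 _ _ (by simpa using hb)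
        · exact h.1 z hz'

lemma foldl_insertBy_pw (before : (String × Int) → (String × Int) → Bool)
    (h1 : ∀ a b, before a b = true → b.2 ≤ a.2)
    (h2 : ∀ a b, before a b = false → a.2 ≤ b.2) :
    ∀ (xs acc : List (String × Int)), acc.Pairwise nonincr →
      (xs.foldl (fun acc x => PySem.List.insertBy before x acc) acc).Pairwise nonincr := by
  intro xs
  induction xs with
  | nil => intro acc h; simpa using h
  | cons x xs ih =>
      intro acc h
      exact ih _ (insertBy_pw before h1 h2 x acc h)

lemma ranked_pairwise (players : List (String × Int)) :
    (PySem.List.sorted2 players (fun p => -p.2) (fun p => p.1)).Pairwise nonincr := by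
  rw [PySem.List.sorted2.eq_def]
  simp only [Bool.false_eq_true, if_false]
  apply foldl_insertBy_pw
  · intro a b hab
    rcases Bool.or_eq_true_iff.1 hab with h | h
    · have : (-a.2 : Int) < -b.2 := of_decide_eq_true h
      omega
    · have : ¬ ((-b.2 : Int) < -a.2) := by
        rcases Bool.and_eq_true_iff.1 h with ⟨h1, _⟩
        simpa using h1
      omega
  · intro a b hab
    have : ¬ ((-a.2 : Int) < -b.2) := by
      rcases Bool.or_eq_false_iff.1 hab with ⟨h1, _⟩
      simpa using h1
    omega
  · exact List.Pairwise.nil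

-- A's foldl over enumerate equals loopA, for any split ranked = pre ++ ys.
lemma foldA (ranked : List (String × Int)) :
    ∀ (ys pre : List (String × Int)) (acc : List (Int × String × Int)) (r : Int),
      ranked = pre ++ ys →
      ((PySem.List.enumerate ys (pre.length : Int)).foldl
        (fun st iv =>
          let rank := if 0 < iv.1 ∧ iv.2.2 < (PySem.List.pyGetD ranked (iv.1 - 1) ("", 0)).2
                      then iv.1 + 1 else st.2
          (st.1 ++ [(rank, iv.2.1, iv.2.2)], rank)) (acc, r)).1
      = acc ++ loopA (pre.getLast?.map (·.2)) (pre.length : Int) r ys := by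
  intro ys
  induction ys with
  | nil => intro pre acc r _; simp [PySem.List.enumerate, loopA]
  | cons v vs ih =>
      intro pre acc r hsplit
      rw [PySem.List.enumerate_cons, List.foldl_cons]
      have hnext : ((pre.length : Int) + 1) = ((pre ++ [v]).length : Int) := by
        simp
      -- the rank computed by A's step for element v at index pre.length
      have hrank :
          (if 0 < (pre.length : Int) ∧ v.2 < (PySem.List.pyGetD ranked ((pre.length : Int) - 1) ("", 0)).2
           then (pre.length : Int) + 1 else r)
          = (match pre.getLast?.map (·.2) with
             | some ps => if v.2 < ps then (pre.length : Int) + 1 else r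
             | none => r) := by
        cases hpre : pre with
        | nil => simp
        | cons q qs =>
            have hlen : 0 < ((q :: qs).length : Int) := by
              exact_mod_cast Nat.succ_pos qs.length
            have hidx : ((q :: qs).length : Int) - 1 = ((qs.length : Nat) : Int) := by
              simp
            have hget : PySem.List.pyGetD ranked (((q :: qs).length : Int) - 1) ("", 0)
                = (q :: qs).getLast (by simp) := by
              rw [hidx, PySem.List.pyGetD_natCast, hsplit, hpre]
              rw [List.getD_eq_getElem?_getD, List.getElem?_append_left (by simp)]
              rw [List.getLast_eq_getElem]
              simp only [List.length_cons, Nat.add_sub_cancel, List.getElem?_eq_getElem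
                (by simp : qs.length < (q :: qs).length), Option.getD_some]
              rfl
            rw [hget]
            have hgl : (q :: qs).getLast? = some ((q :: qs).getLast (by simp)) := by
              simp [List.getLast?_eq_some_getLast]
            rw [hgl]
            simp only [Option.map_some]
            by_cases hv : v.2 < ((q :: qs).getLast (by simp)).2
            · simp [hv]
            · simp [hv]
      set r1 := (if 0 < (pre.length : Int) ∧ v.2 < (PySem.List.pyGetD ranked ((pre.length : Int) - 1) ("", 0)).2
                 then (pre.length : Int) + 1 else r) with hr1
      rw [hnext]
      rw [ih (pre ++ [v]) _ _ (by simpa using hsplit)]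
      simp only [loopA]
      rw [← hrank, ← hnext]
      simp [List.getLast?_append]

-- loopA inside a run of score s: every member keeps rank r, then a boundary follows.
lemma runA : ∀ (vs : List (String × Int)) (s : Int) (i r : Int),
    vs.Pairwise nonincr → (∀ p ∈ vs, p.2 ≤ s) →
    loopA (some s) i r vs =
      (vs.takeWhile (fun q => q.2 == s)).map (fun q => (r, q.1, q.2))
      ++ loopAB (i + (vs.takeWhile (fun q => q.2 == s)).length) (vs.dropWhile (fun q => q.2 == s)) := by
  intro vs
  induction vs with
  | nil => intro s i r _ _; simp [loopA, loopAB]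
  | cons v vs ih =>
      intro s i r hpw hle
      rw [List.pairwise_cons] at hpw
      by_cases hv : v.2 = s
      · have hb : (v.2 == s) = true := by simpa using hv
        have hr' : loopA (some s) i r (v :: vs) = (r, v.1, v.2) :: loopA (some v.2) (i + 1) r vs := by
          simp [loopA, hv]
        rw [hr', hv]
        rw [ih s (i + 1) r hpw.2 (fun p hp => le_trans (hpw.1 p hp) (le_of_eq hv))]
        simp only [List.takeWhile_cons, List.dropWhile_cons, hb, if_true, List.map_cons,
          List.cons_append]
        rw [show (i + 1) + ((vs.takeWhile (fun q => q.2 == s)).length : Int)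
            = i + (((v :: vs.takeWhile (fun q => q.2 == s)).length : Nat) : Int) from by
          push_cast [List.length_cons]; ring]
        rw [hv]
      · have hlt : v.2 < s := lt_of_le_of_ne (hle v (List.mem_cons_self)) hv
        have hb : (v.2 == s) = false := by simpa using hv
        simp only [List.takeWhile_cons, List.dropWhile_cons, hb]
        simp [loopA, loopAB, hlt]

-- at every group boundary loopAB and altEmit agree (fuel induction on the length).
lemma bridgeA : ∀ (n : Nat) (xs : List (String × Int)), xs.length ≤ n → xs.Pairwise nonincr →
    ∀ start : Nat, loopAB (start : Int) xs = altEmit xs start := by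
  intro n
  induction n with
  | zero =>
      intro xs hlen _ start
      have : xs = [] := List.length_eq_zero_iff.1 (Nat.le_zero.1 hlen)
      subst this; simp [loopAB, altEmit]
  | succ n ih =>
      intro xs hlen hpw start
      cases xs with
      | nil => simp [loopAB, altEmit]
      | cons v vs =>
          rw [List.pairwise_cons] at hpw
          have hrun := runA vs v.2 ((start : Int) + 1) ((start : Int) + 1) hpw.2 hpw.1
          have hdroplen : (vs.dropWhile (fun q => q.2 == v.2)).length ≤ n := by
            have h1 := List.length_dropWhile_le (fun q => q.2 == v.2) vs
            simp only [List.length_cons] at hlen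
            omega
          have hdroppw : (vs.dropWhile (fun q => q.2 == v.2)).Pairwise nonincr :=
            hpw.2.sublist (List.dropWhile_sublist _)
          have hih := ih _ hdroplen hdroppw (start + 1 + (vs.takeWhile (fun q => q.2 == v.2)).length)
          show (((start : Int)) + 1, v.1, v.2) :: loopA (some v.2) ((start : Int) + 1) ((start : Int) + 1) vs
              = altEmit (v :: vs) start
          rw [hrun]
          have hcast : ((start : Int) + 1 + ((vs.takeWhile (fun q => q.2 == v.2)).length : Int))
              = ((start + 1 + (vs.takeWhile (fun q => q.2 == v.2)).length : Nat) : Int) := by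
            push_cast; ring
          rw [hcast, hih]
          rw [altEmit]
          simp only [List.takeWhile_cons, List.dropWhile_cons, BEq.rfl, if_true,
            List.map_cons, List.length_cons, List.cons_append]
          rw [show start + ((vs.takeWhile (fun q => q.2 == v.2)).length + 1)
              = start + 1 + (vs.takeWhile (fun q => q.2 == v.2)).length from by omega]

-- ===== VERDICT (by name: the statement is the Claim_ definition above) =====
theorem rank_players_spec : Claim_equal_rank_players := by
  intro players _
  show rank_players players = rank_players_alt players
  unfold rank_players rank_players_alt
  dsimp only
  have hpw := ranked_pairwise players
  have h0 := foldA (PySem.List.sorted2 players (fun p => -p.2) (fun p => p.1))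
      (PySem.List.sorted2 players (fun p => -p.2) (fun p => p.1)) [] [] 1 rfl
  simp only [List.length_nil, Nat.cast_zero, List.getLast?_nil, Option.map_none,
    List.nil_append] at h0
  rw [h0]
  generalize hq : PySem.List.sorted2 players (fun p => -p.2) (fun p => p.1) = ranked at hpw ⊢
  cases ranked with
  | nil => simp [loopA, altEmit]
  | cons v vs =>
      have hstep : loopA none 0 1 (v :: vs) = loopAB (((0 : Nat) : Int)) (v :: vs) := by
        simp [loopA, loopAB]
      rw [hstep]
      exact bridgeA (v :: vs).length (v :: vs) le_rfl hpw 0
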